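-- pv_equiv track=rewrite | github.com/jjstiens/ch8_coursework | codon_usage.py | codonFreq
-- ===== SOURCE A (Python) =====
-- def codonFreq(dna):
--     """Return frequency of each codon possibility in particular sequence.
--     Input       acc                     accession number
--                 dna                     coding sequence (dna)
--
--     Output      CodonsDict              dictionary of codon frequencies in sequence
--     """
--
--     CodonsDict = {
--         'TTT': 0, 'TTC': 0, 'TTA': 0, 'TTG': 0, 'CTT': 0,
--         'CTC': 0, 'CTA': 0, 'CTG': 0, 'ATT': 0, 'ATC': 0,
--         'ATA': 0, 'ATG': 0, 'GTT': 0, 'GTC': 0, 'GTA': 0,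
--         'GTG': 0, 'TAT': 0, 'TAC': 0, 'TAA': 0, 'TAG': 0,
--         'CAT': 0, 'CAC': 0, 'CAA': 0, 'CAG': 0, 'AAT': 0,
--         'AAC': 0, 'AAA': 0, 'AAG': 0, 'GAT': 0, 'GAC': 0,
--         'GAA': 0, 'GAG': 0, 'TCT': 0, 'TCC': 0, 'TCA': 0,
--         'TCG': 0, 'CCT': 0, 'CCC': 0, 'CCA': 0, 'CCG': 0,
--         'ACT': 0, 'ACC': 0, 'ACA': 0, 'ACG': 0, 'GCT': 0,
--         'GCC': 0, 'GCA': 0, 'GCG': 0, 'TGT': 0, 'TGC': 0,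
--         'TGA': 0, 'TGG': 0, 'CGT': 0, 'CGC': 0, 'CGA': 0,
--         'CGG': 0, 'AGT': 0, 'AGC': 0, 'AGA': 0, 'AGG': 0,
--         'GGT': 0, 'GGC': 0, 'GGA': 0, 'GGG': 0}
--
--
--     # format sequence to unbroken uppercase string
--     dna = dna.upper()
--     # divide sequence into a list of codons
--     codon = ''
--     codon_list = []
--     for s in dna:
--         codon += s
--         if len(codon) == 3:
--             codon_list.append(codon)
--             codon = ''
--
--     # Update dictionary for codon frequencies
--     for x in codon_list:
--          if x in CodonsDict:
--              CodonsDict[x] += 1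
--     return CodonsDict
-- ===== SOURCE B (Python) =====
-- def codonFreq(dna):
--     """Return frequency of each codon possibility in particular sequence."""
--     dna = dna.upper()
--     # the full-length codons (any trailing 1-2 bases are not a codon)
--     codons = [dna[i:i + 3] for i in range(0, len(dna) - 2, 3)]
--     # the 64 codons, generated in the standard codon-table order, each
--     # paired with its count; codons containing other letters count nowhere,
--     # matching the membership filter of the original
--     return {f + m + l: codons.count(f + m + l)
--             for m in 'TACG' for f in 'TCAG' for l in 'TCAG'}
-- ===== Notes on version B (the rewrite author's own statement) =====
-- stated objective: simpler
-- what changed: Replaces A's hand-written 64-entry zero dictionary, char-by-char codon accumulator and in-place counting loop with a striding slice comprehension producing the full codons and a single dict comprehension over the 64 generated keys using list.count, so no mutable dictionary or accumulator state remains.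
import Mathlib
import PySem

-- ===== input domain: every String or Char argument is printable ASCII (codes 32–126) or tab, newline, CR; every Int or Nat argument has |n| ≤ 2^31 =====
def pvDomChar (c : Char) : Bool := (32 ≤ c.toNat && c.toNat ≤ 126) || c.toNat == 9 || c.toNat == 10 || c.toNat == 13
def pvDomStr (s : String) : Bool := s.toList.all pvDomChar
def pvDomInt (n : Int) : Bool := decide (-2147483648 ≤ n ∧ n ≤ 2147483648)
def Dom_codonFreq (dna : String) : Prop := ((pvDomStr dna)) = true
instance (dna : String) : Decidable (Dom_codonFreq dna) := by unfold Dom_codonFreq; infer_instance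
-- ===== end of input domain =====

-- B replaces A's literal 64-entry zero dictionary, codon accumulator and mutating count loop by a
-- slice comprehension plus a dict comprehension over the 64 generated keys (objective: simpler).

-- ===== PORT A =====
-- the 64-key zero dictionary literal of A
def codonInit : PySem.Dict String Int := PySem.Dict.ofList
  [("TTT", 0), ("TTC", 0), ("TTA", 0), ("TTG", 0), ("CTT", 0),
   ("CTC", 0), ("CTA", 0), ("CTG", 0), ("ATT", 0), ("ATC", 0),
   ("ATA", 0), ("ATG", 0), ("GTT", 0), ("GTC", 0), ("GTA", 0),
   ("GTG", 0), ("TAT", 0), ("TAC", 0), ("TAA", 0), ("TAG", 0),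
   ("CAT", 0), ("CAC", 0), ("CAA", 0), ("CAG", 0), ("AAT", 0),
   ("AAC", 0), ("AAA", 0), ("AAG", 0), ("GAT", 0), ("GAC", 0),
   ("GAA", 0), ("GAG", 0), ("TCT", 0), ("TCC", 0), ("TCA", 0),
   ("TCG", 0), ("CCT", 0), ("CCC", 0), ("CCA", 0), ("CCG", 0),
   ("ACT", 0), ("ACC", 0), ("ACA", 0), ("ACG", 0), ("GCT", 0),
   ("GCC", 0), ("GCA", 0), ("GCG", 0), ("TGT", 0), ("TGC", 0),
   ("TGA", 0), ("TGG", 0), ("CGT", 0), ("CGC", 0), ("CGA", 0),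
   ("CGG", 0), ("AGT", 0), ("AGC", 0), ("AGA", 0), ("AGG", 0),
   ("GGT", 0), ("GGC", 0), ("GGA", 0), ("GGG", 0)]

def codonStep (st : List Char × List String) (s : Char) : List Char × List String :=
  let codon := st.1 ++ [s]
  if codon.length == 3 then (([] : List Char), st.2 ++ [String.ofList codon])
  else (codon, st.2)

def codonFreq (dna : String) : List (String × Int) :=
  let dnaU := (PySem.Str.upper dna).toList
  -- for s in dna: codon += s; if len(codon) == 3: codon_list.append(codon); codon = ''
  let st := dnaU.foldl codonStep (([] : List Char), ([] : List String))
  -- for x in codon_list: if x in CodonsDict: CodonsDict[x] += 1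
  (st.2.foldl (fun d x => if d.contains x then d.modify x 0 (· + 1) else d) codonInit).items

-- ===== PORT B =====
def codonFreq_alt (dna : String) : List (String × Int) :=
  let u := (PySem.Str.upper dna).toList
  -- codons = [dna[i:i+3] for i in range(0, len(dna) - 2, 3)]
  let codons := (PySem.List.pyRange 0 ((u.length : Int) - 2) 3).map
    (fun i => String.ofList (PySem.List.slice u (some i) (some (i + 3))))
  -- {f+m+l: codons.count(f+m+l) for m in 'TACG' for f in 'TCAG' for l in 'TCAG'}
  (PySem.Dict.ofList
    ("TACG".toList.flatMap (fun m =>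
      "TCAG".toList.flatMap (fun f =>
        "TCAG".toList.map (fun l =>
          (String.ofList [f, m, l],
           (PySem.List.count codons (String.ofList [f, m, l]) : Int))))))).items

-- ===== PRECONDITION & SPEC =====
def Spec_codonFreq (dna : String) (out : List (String × Int)) : Prop := out = codonFreq_alt dna
instance (dna : String) (out : List (String × Int)) : Decidable (Spec_codonFreq dna out) := by unfold Spec_codonFreq; infer_instance

-- ===== CLAIM (what is proved, stated in full; the proofs are below) =====
def Claim_equal_codonFreq : Prop := ∀ (dna : String), Dom_codonFreq dna → Spec_codonFreq dna (codonFreq dna)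

-- ===== LEMMAS AND PROOFS =====

def chunks3 : List Char → List (List Char)
  | [] => []
  | [_] => []
  | [_, _] => []
  | a :: b :: c :: r => [a, b, c] :: chunks3 r

lemma foldA_snd (l : List Char) : ∀ acc : List String,
    (l.foldl codonStep (([] : List Char), acc)).2
      = acc ++ (chunks3 l).map String.ofList := by
  induction l using chunks3.induct with
  | case1 => intro acc; simp [chunks3]
  | case2 a => intro acc; simp [chunks3, codonStep]
  | case3 a b => intro acc; simp [chunks3, codonStep]
  | case4 a b c r ih =>
    intro acc
    have h3 : List.foldl codonStep (([] : List Char), acc) (a :: b :: c :: r)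
        = List.foldl codonStep (([] : List Char), acc ++ [String.ofList [a, b, c]]) r := rfl
    rw [h3, ih]
    simp [chunks3]

lemma pyRange3_cons' (m : Nat) :
    PySem.List.pyRange 0 ((m : Int) + 1) 3
      = 0 :: (PySem.List.pyRange 0 ((m : Int) - 2) 3).map (· + 3) := by
  rw [PySem.List.pyRange_of_pos 0 _ (by norm_num),
      PySem.List.pyRange_of_pos 0 _ (by norm_num)]
  have h1 : (0 : Int) < (m : Int) + 1 := by positivity
  simp only [h1, if_true]
  have e1 : (((m : Int) + 1 - 0 + 3 - 1) / 3).toNat = m / 3 + 1 := by omega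
  rw [e1, List.range_succ_eq_map]
  by_cases hm : (0 : Int) < (m : Int) - 2
  · simp only [hm, if_true]
    have e2 : (((m : Int) - 2 - 0 + 3 - 1) / 3).toNat = m / 3 := by omega
    rw [e2, List.map_map]
    simp only [List.map_cons, List.map_map]
    refine congrArg₂ _ (by ring) ?_
    apply List.map_congr_left; intro k _; simp [Function.comp]; ring
  · simp only [hm, if_false]
    have e3 : m / 3 = 0 := by omega
    rw [e3]
    norm_num

lemma sliceRangeFull (l : List Char) :
    (PySem.List.pyRange 0 ((l.length : Int) - 2) 3).map
        (fun i => PySem.List.slice l (some i) (some (i + 3)))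
      = chunks3 l := by
  induction l using chunks3.induct with
  | case1 => simp [chunks3, show PySem.List.pyRange 0 (-2) 3 = [] from by decide]
  | case2 a => simp [chunks3, show PySem.List.pyRange 0 (-1) 3 = [] from by decide]
  | case3 a b => simp [chunks3, show PySem.List.pyRange 0 0 3 = [] from by decide]
  | case4 a b c r ih =>
    have hlen : ((a :: b :: c :: r).length : Int) - 2 = (r.length : Int) + 1 := by
      simp; ring
    rw [hlen, pyRange3_cons', List.map_cons, List.map_map]
    have hhead : PySem.List.slice (a :: b :: c :: r) (some 0) (some (0 + 3)) = [a, b, c] := by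
      rw [PySem.List.slice_toNat _ (by norm_num) (by norm_num)]
      norm_num
      rfl
    have htail : ∀ i ∈ PySem.List.pyRange 0 ((r.length : Int) - 2) 3,
        ((fun i => PySem.List.slice (a :: b :: c :: r) (some i) (some (i + 3))) ∘ (· + 3)) i
          = PySem.List.slice r (some i) (some (i + 3)) := by
      intro i hi
      have h0 : 0 ≤ i :=
        ((PySem.List.mem_pyRange_iff_of_pos (by norm_num : (0:Int) < 3) i).mp hi).1
      simp only [Function.comp]
      rw [PySem.List.slice_toNat _ (by omega) (by omega),
          PySem.List.slice_toNat _ h0 (by omega)]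
      have e6 : (i + 3 + 3).toNat - (i + 3).toNat = 3 := by omega
      have e33 : (i + 3).toNat - i.toNat = 3 := by omega
      rw [e6, e33, show (i + 3).toNat = 3 + i.toNat from by omega, ← List.drop_drop]
      rfl
    rw [List.map_congr_left htail, ih, hhead]
    simp [chunks3]

lemma step_keys (d : PySem.Dict String Int) (x : String) :
    (if d.contains x then d.modify x 0 (· + 1) else d).keys = d.keys := by
  by_cases h : d.contains x = true
  · simp [h, PySem.Dict.keys_modify, PySem.Dict.keys_insert_of_contains d _ h]
  · simp [h]

lemma step_items (d : PySem.Dict String Int) (x : String) (h : d.keys.Nodup) :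
    (if d.contains x then d.modify x 0 (· + 1) else d).items
      = d.items.map (fun p => if p.1 == x then (p.1, p.2 + 1) else p) := by
  by_cases hc : d.contains x = true
  · simp only [hc, if_true, PySem.Dict.modify,
      PySem.Dict.items_insert_of_contains d _ hc]
    apply List.map_congr_left
    intro p hp
    by_cases he : p.1 == x
    · have hx : p.1 = x := by exact eq_of_beq he
      have : d.get? p.1 = some p.2 :=
        PySem.Dict.get?_of_mem_items d (by exact (Prod.mk.eta ▸ hp)) h
      have hg : d.getD x 0 = p.2 := by
        rw [← hx]; exact PySem.Dict.getD_of_get?_eq_some d 0 this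
      simp [hg, hx]
    · simp [he]
  · simp only [hc, if_false, Bool.false_eq_true]
    have hall : ∀ p ∈ d.items, (fun p : String × Int => if p.1 == x then (p.1, p.2 + 1) else p) p = p := by
      intro p hp
      have hk : p.1 ∈ d.keys := PySem.Dict.mem_keys_of_mem_items d hp
      have hne : ¬ (p.1 == x) = true := by
        intro hb
        have hx : x ∈ d.keys := by rwa [eq_of_beq hb] at hk
        rw [← PySem.Dict.contains_iff_mem_keys] at hx
        exact absurd hx (by simp [hc])
      simp [hne]
    rw [List.map_congr_left hall]; simp

lemma countLoop_items (l : List String) (d : PySem.Dict String Int) (h : d.keys.Nodup) :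
    (l.foldl (fun d x => if d.contains x then d.modify x 0 (· + 1) else d) d).items
      = d.items.map (fun p => (p.1, p.2 + (l.count p.1 : Int))) := by
  induction l generalizing d with
  | nil => simp
  | cons x l ih =>
    rw [List.foldl_cons, ih _ (by rw [step_keys]; exact h), step_items d x h,
      List.map_map]
    apply List.map_congr_left
    intro p hp
    by_cases he : p.1 == x
    · simp [Function.comp, eq_of_beq he]
      ring
    · have : ¬ x = p.1 := fun hx => he (beq_iff_eq.mpr hx.symm)
      simp [Function.comp, he, this]

-- items of a dict built from pairs with distinct keys are those pairs, appended to d's items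
lemma update_items_of_disjoint {κ ν : Type} [BEq κ] [LawfulBEq κ] (ps : List (κ × ν)) :
    ∀ (d : PySem.Dict κ ν), (ps.map Prod.fst).Nodup →
      (∀ p ∈ ps, d.contains p.1 = false) →
      (d.update ps).items = d.items ++ ps := by
  induction ps with
  | nil => intro d _ _; simp [PySem.Dict.update]
  | cons p ps ih =>
    intro d hnd hdis
    rw [List.map_cons, List.nodup_cons] at hnd
    have hstep : d.update (p :: ps) = (d.insert p.1 p.2).update ps := rfl
    rw [hstep, ih (d.insert p.1 p.2) hnd.2
      (by
        intro q hq
        rw [PySem.Dict.contains_insert]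
        have h1 : ¬ q.1 = p.1 := by
          intro he
          exact hnd.1 (by
            have hm : q.1 ∈ ps.map Prod.fst := List.mem_map_of_mem hq
            rwa [he] at hm)
        simp [h1, hdis q (List.mem_cons_of_mem _ hq)]),
      PySem.Dict.items_insert_of_not_contains d p.2 (hdis p (List.mem_cons_self))]
    simp

set_option maxRecDepth 8192 in
lemma codonInit_items :
    codonInit.items
      = "TACG".toList.flatMap (fun m =>
          "TCAG".toList.flatMap (fun f =>
            "TCAG".toList.map (fun l => (String.ofList [f, m, l], (0 : Int))))) := by
  decide

set_option maxRecDepth 8192 in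
lemma codonKeys_nodup :
    ("TACG".toList.flatMap (fun m =>
      "TCAG".toList.flatMap (fun f =>
        "TCAG".toList.map (fun l => String.ofList [f, m, l])))).Nodup := by
  decide

set_option maxRecDepth 4096 in
lemma codonInit_nodup : codonInit.keys.Nodup := by decide

-- ===== VERDICT (by name: the statement is the Claim_ definition above) =====
set_option maxHeartbeats 2000000 in
theorem codonFreq_spec : Claim_equal_codonFreq := by
  intro dna _
  unfold Spec_codonFreq codonFreq codonFreq_alt
  change (List.foldl (fun d x => if d.contains x then d.modify x 0 (· + 1) else d) codonInit
      ((List.foldl codonStep (([] : List Char), ([] : List String))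
        ((PySem.Str.upper dna).toList)).2)).items
    = (PySem.Dict.ofList
        ("TACG".toList.flatMap (fun m =>
          "TCAG".toList.flatMap (fun f =>
            "TCAG".toList.map (fun l =>
              (String.ofList [f, m, l],
               (PySem.List.count
                 ((PySem.List.pyRange 0 ((((PySem.Str.upper dna).toList).length : Int) - 2) 3).map
                   (fun i => String.ofList
                     (PySem.List.slice ((PySem.Str.upper dna).toList) (some i) (some (i + 3)))))
                 (String.ofList [f, m, l]) : Int))))))).items
  set u := (PySem.Str.upper dna).toList with hu
  -- A side
  rw [foldA_snd, List.nil_append, countLoop_items _ _ codonInit_nodup]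
  -- B's codon list equals A's codon list
  have hcodons :
      (PySem.List.pyRange 0 ((u.length : Int) - 2) 3).map
        (fun i => String.ofList (PySem.List.slice u (some i) (some (i + 3))))
      = (chunks3 u).map String.ofList := by
    have h := congrArg (List.map String.ofList) (sliceRangeFull u)
    rw [List.map_map] at h
    simpa [Function.comp_def] using h
  rw [hcodons]
  -- B's dict comprehension lists exactly its pairs
  simp only [PySem.Dict.ofList]
  rw [update_items_of_disjoint _ _
    (by
      simp only [List.map_flatMap, List.map_map, Function.comp_def]
      exact codonKeys_nodup)
    (by intro p _; simp [PySem.Dict.contains_empty]),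
    codonInit_items]
  simp only [List.map_flatMap, List.map_map, Function.comp_def, PySem.List.count_eq, zero_add, PySem.Dict.empty, List.nil_append]
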